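-- pv_equiv track=rewrite | github.com/letzgorats/Leetcode | leetcode/2264/Largest 3-Same-Digit Number in String.py | largestGoodInteger
-- ===== SOURCE A (Python) =====
-- def largestGoodInteger(num):
--     """
--     :type num: str
--     :rtype: str
--     """
--
--     case = [0,1,2,3,4,5,6,7,8,9]
--     answer = -1
--     for i in range(10):
--         if str(case[i]) * 3 in num:
--             answer = max(case[i],answer)
--
--     if answer == -1:
--         return ""
--     else:
--         return str(answer) * 3
-- ===== SOURCE B (Python) =====
-- def largestGoodInteger(num):
--     best = None
--     for i in range(len(num) - 2):
--         c = num[i]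
--         if c == num[i + 1] == num[i + 2] and c.isdigit():
--             best = c if best is None else max(best, c)
--     return "" if best is None else best * 3
-- ===== Notes on version B (the rewrite author's own statement) =====
-- stated objective: alternative
-- what changed: Replaced A's ten fixed substring-membership tests ('000' in num ... '999' in num) by a single positional scan over the string that records the maximum digit occurring three times in a row.
import Mathlib
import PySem

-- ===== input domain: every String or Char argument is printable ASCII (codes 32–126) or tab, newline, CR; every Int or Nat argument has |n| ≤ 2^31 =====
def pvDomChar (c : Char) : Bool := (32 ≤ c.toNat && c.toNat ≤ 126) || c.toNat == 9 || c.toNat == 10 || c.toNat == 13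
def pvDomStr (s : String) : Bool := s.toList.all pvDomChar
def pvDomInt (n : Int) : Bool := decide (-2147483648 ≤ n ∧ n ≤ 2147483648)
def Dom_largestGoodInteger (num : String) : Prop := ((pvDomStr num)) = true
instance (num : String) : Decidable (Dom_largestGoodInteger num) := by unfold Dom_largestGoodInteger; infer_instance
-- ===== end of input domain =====

-- B replaces A's ten fixed substring-membership tests ("000" in num … "999" in num)
-- with a single positional scan that keeps the maximum digit seen in a run of three;
-- objective: alternative decomposition (same linear cost, one pass, no substring search).

-- ===== PORT A =====
-- A: case = [0..9]; answer = -1; for i in range(10): if str(case[i])*3 in num: answer = max(case[i], answer)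
def largestGoodInteger (num : String) : String :=
  let case : List Int := [0,1,2,3,4,5,6,7,8,9]
  let answer : Int :=
    (PySem.List.pyRange 0 10 1).foldl
      (fun answer i =>
        if PySem.Str.isIn
            (String.ofList (PySem.List.pyRepeat (PySem.Int.toChars (PySem.List.pyGetD case i 0)) 3)) num
        then max (PySem.List.pyGetD case i 0) answer
        else answer)
      (-1)
  if answer = -1 then ""
  else String.ofList (PySem.List.pyRepeat (PySem.Int.toChars answer) 3)

-- ===== PORT B =====
-- B's index loop 'for i in range(len(num)-2): look at num[i], num[i+1], num[i+2]'
-- transcribed as structural recursion over the character list (window of three).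
def scanBest : List Char → Option Char → Option Char
  | c1 :: c2 :: c3 :: rest, best =>
      scanBest (c2 :: c3 :: rest)
        (if c1 == c2 && c2 == c3 && PySem.Chars.isdigit c1 then
           some (match best with
                 | none => c1
                 | some b => max b c1)
         else best)
  | _, best => best

def largestGoodInteger_alt (num : String) : String :=
  match scanBest num.toList none with
  | none => ""
  | some c => String.ofList (PySem.List.pyRepeat [c] 3)

-- ===== PRECONDITION & SPEC =====
def Spec_largestGoodInteger (num : String) (out : String) : Prop := out = largestGoodInteger_alt num
instance (num : String) (out : String) : Decidable (Spec_largestGoodInteger num out) := by unfold Spec_largestGoodInteger; infer_instance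

-- ===== CLAIM (what is proved, stated in full; the proofs are below) =====
def Claim_equal_largestGoodInteger : Prop := ∀ (num : String), Dom_largestGoodInteger num → Spec_largestGoodInteger num (largestGoodInteger num)

-- ===== LEMMAS AND PROOFS =====

-- The exact if-tree A's ten-step foldl produces, with the ten membership tests abstracted.
def aTree (t0 t1 t2 t3 t4 t5 t6 t7 t8 t9 : Bool) : String :=
  let a0 : Int := if t0 then max 0 (-1) else (-1)
  let a1 : Int := if t1 then max 1 a0 else a0
  let a2 : Int := if t2 then max 2 a1 else a1
  let a3 : Int := if t3 then max 3 a2 else a2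
  let a4 : Int := if t4 then max 4 a3 else a3
  let a5 : Int := if t5 then max 5 a4 else a4
  let a6 : Int := if t6 then max 6 a5 else a5
  let a7 : Int := if t7 then max 7 a6 else a6
  let a8 : Int := if t8 then max 8 a7 else a7
  let a9 : Int := if t9 then max 9 a8 else a8
  if a9 = -1 then "" else String.ofList (PySem.List.pyRepeat (PySem.Int.toChars a9) 3)

-- The highest digit whose triple-test fires, as a cascade.
def casc (t0 t1 t2 t3 t4 t5 t6 t7 t8 t9 : Bool) : String :=
  if t9 then "999" else if t8 then "888" else if t7 then "777" else if t6 then "666"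
  else if t5 then "555" else if t4 then "444" else if t3 then "333" else if t2 then "222"
  else if t1 then "111" else if t0 then "000" else ""

def trip3 (c : Char) (l : List Char) : Bool := PySem.Chars.isIn [c, c, c] l

lemma aTree_eq_casc (t0 t1 t2 t3 t4 t5 t6 t7 t8 t9 : Bool) :
    aTree t0 t1 t2 t3 t4 t5 t6 t7 t8 t9 = casc t0 t1 t2 t3 t4 t5 t6 t7 t8 t9 := by
  revert t0 t1 t2 t3 t4 t5 t6 t7 t8 t9
  decide

lemma A_eq_aTree (num : String) :
    largestGoodInteger num =
      aTree (trip3 '0' num.toList) (trip3 '1' num.toList) (trip3 '2' num.toList)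
            (trip3 '3' num.toList) (trip3 '4' num.toList) (trip3 '5' num.toList)
            (trip3 '6' num.toList) (trip3 '7' num.toList) (trip3 '8' num.toList)
            (trip3 '9' num.toList) := by
  rfl

-- the list of digits recorded by B's scan, in scan order
def trips : List Char → List Char
  | c1 :: c2 :: c3 :: rest =>
      (if c1 == c2 && c2 == c3 && PySem.Chars.isdigit c1 then [c1] else []) ++ trips (c2 :: c3 :: rest)
  | _ => []

lemma scanBest_eq_foldl (l : List Char) (best : Option Char) :
    scanBest l best =
      (trips l).foldl (fun b c => some (match b with | none => c | some b => max b c)) best := by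
  induction l generalizing best with
  | nil => rfl
  | cons c1 t ih =>
      cases t with
      | nil => rfl
      | cons c2 t2 =>
        cases t2 with
        | nil => rfl
        | cons c3 rest =>
          simp only [scanBest, trips]
          by_cases h : (c1 == c2 && c2 == c3 && PySem.Chars.isdigit c1) = true <;>
            simp [h, ih]

lemma foldl_max_some (xs : List Char) (a : Char) :
    xs.foldl (fun b c => some (match b with | none => c | some b => max b c)) (some a) =
      some (xs.foldl max a) := by
  induction xs generalizing a with
  | nil => rfl
  | cons x xs ih => simp [List.foldl, ih]

lemma scanBest_eq_max? (l : List Char) : scanBest l none = (trips l).max? := by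
  rw [scanBest_eq_foldl]
  match h : trips l with
  | [] => rfl
  | a :: xs => simp [List.foldl, List.max?, foldl_max_some]

lemma mem_trips_iff (l : List Char) (c : Char) :
    c ∈ trips l ↔ PySem.Chars.isdigit c = true ∧ [c, c, c] <:+: l := by
  induction l with
  | nil => simp [trips]
  | cons c1 t ih =>
      cases t with
      | nil =>
          simp only [trips, List.not_mem_nil, false_iff, not_and]
          intro _ h
          have := h.length_le
          simp at this
      | cons c2 t2 =>
        cases t2 with
        | nil =>
          simp only [trips, List.not_mem_nil, false_iff, not_and]
          intro _ h
          have := h.length_le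
          simp at this
        | cons c3 rest =>
          simp only [trips]
          constructor
          · intro hmem
            rcases List.mem_append.mp hmem with hl | hr
            · by_cases h : (c1 == c2 && c2 == c3 && PySem.Chars.isdigit c1) = true
              · simp only [if_pos h, List.mem_singleton] at hl
                subst hl
                simp only [Bool.and_eq_true, beq_iff_eq] at h
                obtain ⟨⟨h12, h23⟩, hd⟩ := h
                subst h12
                subst h23
                exact ⟨hd, ⟨[], rest, rfl⟩⟩
              · rw [if_neg h] at hl
                exact (List.not_mem_nil hl).elim
            · have h2 := ih.mp hr
              exact ⟨h2.1, h2.2.trans (List.suffix_cons c1 (c2 :: c3 :: rest)).isInfix⟩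
          · rintro ⟨hd, hinf⟩
            rcases List.infix_cons_iff.mp hinf with hp | hs
            · obtain ⟨h1, hp'⟩ := List.cons_prefix_cons.mp hp
              obtain ⟨h2, hp''⟩ := List.cons_prefix_cons.mp hp'
              obtain ⟨h3, -⟩ := List.cons_prefix_cons.mp hp''
              subst h1
              subst h2
              subst h3
              simp [hd]
            · exact List.mem_append.mpr (Or.inr (ih.mpr ⟨hd, hs⟩))

lemma digit_mem (c : Char) (h : PySem.Chars.isdigit c = true) :
    c ∈ ['0','1','2','3','4','5','6','7','8','9'] := by
  simp only [PySem.Chars.isdigit, Bool.and_eq_true, decide_eq_true_eq] at h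
  have h1 : 48 ≤ c.toNat := h.1
  have h2 : c.toNat ≤ 57 := h.2
  have inj : ∀ d : Char, c.toNat = d.toNat → c = d := by
    intro d hd
    exact Char.ext (UInt32.toNat_inj.mp hd)
  interval_cases hn : c.toNat
  · rw [inj '0' (by decide)]; decide
  · rw [inj '1' (by decide)]; decide
  · rw [inj '2' (by decide)]; decide
  · rw [inj '3' (by decide)]; decide
  · rw [inj '4' (by decide)]; decide
  · rw [inj '5' (by decide)]; decide
  · rw [inj '6' (by decide)]; decide
  · rw [inj '7' (by decide)]; decide
  · rw [inj '8' (by decide)]; decide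
  · rw [inj '9' (by decide)]; decide

lemma trip3_true_of_mem (l : List Char) (c : Char) (h : c ∈ trips l) : trip3 c l = true := by
  have := (mem_trips_iff l c).mp h
  exact (PySem.Chars.isIn_iff_infix _ _).mpr this.2

lemma mem_trips_of_trip3 (l : List Char) (c : Char)
    (hd : PySem.Chars.isdigit c = true) (h : trip3 c l = true) : c ∈ trips l :=
  (mem_trips_iff l c).mpr ⟨hd, (PySem.Chars.isIn_iff_infix _ _).mp h⟩

lemma not_trip3_of_gt (l : List Char) (m d : Char)
    (hmax : ∀ b ∈ trips l, b ≤ m) (hd : PySem.Chars.isdigit d = true) (hgt : m < d) :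
    trip3 d l = false := by
  by_contra hne
  have ht : trip3 d l = true := by
    cases h : trip3 d l
    · exact absurd h hne
    · rfl
  have := hmax d (mem_trips_of_trip3 l d hd ht)
  exact absurd this (not_le.mpr hgt)

lemma B_eq_casc (num : String) :
    largestGoodInteger_alt num =
      casc (trip3 '0' num.toList) (trip3 '1' num.toList) (trip3 '2' num.toList)
           (trip3 '3' num.toList) (trip3 '4' num.toList) (trip3 '5' num.toList)
           (trip3 '6' num.toList) (trip3 '7' num.toList) (trip3 '8' num.toList)
           (trip3 '9' num.toList) := by
  set l := num.toList with hl
  rw [largestGoodInteger_alt, ← hl, scanBest_eq_max?]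
  match hm : (trips l).max? with
  | none =>
      have hnil : trips l = [] := List.max?_eq_none_iff.mp hm
      have hfalse : ∀ c, PySem.Chars.isdigit c = true → trip3 c l = false := by
        intro c hdc
        by_contra hne
        have ht : trip3 c l = true := by
          cases h : trip3 c l
          · exact absurd h hne
          · rfl
        have := mem_trips_of_trip3 l c hdc ht
        simp [hnil] at this
      simp [casc, hfalse '0' (by decide), hfalse '1' (by decide), hfalse '2' (by decide),
            hfalse '3' (by decide), hfalse '4' (by decide), hfalse '5' (by decide),
            hfalse '6' (by decide), hfalse '7' (by decide), hfalse '8' (by decide),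
            hfalse '9' (by decide)]
  | some m =>
      obtain ⟨hmem, hmax⟩ := List.max?_eq_some_iff.mp hm
      have hdm : PySem.Chars.isdigit m = true := ((mem_trips_iff l m).mp hmem).1
      have hself : trip3 m l = true := trip3_true_of_mem l m hmem
      have habove : ∀ d : Char, PySem.Chars.isdigit d = true → m < d → trip3 d l = false :=
        fun d hd hlt => not_trip3_of_gt l m d hmax hd hlt
      have hm10 := digit_mem m hdm
      simp only [List.mem_cons, List.not_mem_nil, or_false] at hm10
      rcases hm10 with rfl|rfl|rfl|rfl|rfl|rfl|rfl|rfl|rfl|rfl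
      · have f1 := habove '1' (by decide) (by decide)
        have f2 := habove '2' (by decide) (by decide)
        have f3 := habove '3' (by decide) (by decide)
        have f4 := habove '4' (by decide) (by decide)
        have f5 := habove '5' (by decide) (by decide)
        have f6 := habove '6' (by decide) (by decide)
        have f7 := habove '7' (by decide) (by decide)
        have f8 := habove '8' (by decide) (by decide)
        have f9 := habove '9' (by decide) (by decide)
        simp [casc, hself, f1, f2, f3, f4, f5, f6, f7, f8, f9]
      · have f2 := habove '2' (by decide) (by decide)
        have f3 := habove '3' (by decide) (by decide)
        have f4 := habove '4' (by decide) (by decide)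
        have f5 := habove '5' (by decide) (by decide)
        have f6 := habove '6' (by decide) (by decide)
        have f7 := habove '7' (by decide) (by decide)
        have f8 := habove '8' (by decide) (by decide)
        have f9 := habove '9' (by decide) (by decide)
        simp [casc, hself, f2, f3, f4, f5, f6, f7, f8, f9]
      · have f3 := habove '3' (by decide) (by decide)
        have f4 := habove '4' (by decide) (by decide)
        have f5 := habove '5' (by decide) (by decide)
        have f6 := habove '6' (by decide) (by decide)
        have f7 := habove '7' (by decide) (by decide)
        have f8 := habove '8' (by decide) (by decide)
        have f9 := habove '9' (by decide) (by decide)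
        simp [casc, hself, f3, f4, f5, f6, f7, f8, f9]
      · have f4 := habove '4' (by decide) (by decide)
        have f5 := habove '5' (by decide) (by decide)
        have f6 := habove '6' (by decide) (by decide)
        have f7 := habove '7' (by decide) (by decide)
        have f8 := habove '8' (by decide) (by decide)
        have f9 := habove '9' (by decide) (by decide)
        simp [casc, hself, f4, f5, f6, f7, f8, f9]
      · have f5 := habove '5' (by decide) (by decide)
        have f6 := habove '6' (by decide) (by decide)
        have f7 := habove '7' (by decide) (by decide)
        have f8 := habove '8' (by decide) (by decide)
        have f9 := habove '9' (by decide) (by decide)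
        simp [casc, hself, f5, f6, f7, f8, f9]
      · have f6 := habove '6' (by decide) (by decide)
        have f7 := habove '7' (by decide) (by decide)
        have f8 := habove '8' (by decide) (by decide)
        have f9 := habove '9' (by decide) (by decide)
        simp [casc, hself, f6, f7, f8, f9]
      · have f7 := habove '7' (by decide) (by decide)
        have f8 := habove '8' (by decide) (by decide)
        have f9 := habove '9' (by decide) (by decide)
        simp [casc, hself, f7, f8, f9]
      · have f8 := habove '8' (by decide) (by decide)
        have f9 := habove '9' (by decide) (by decide)
        simp [casc, hself, f8, f9]
      · have f9 := habove '9' (by decide) (by decide)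
        simp [casc, hself, f9]
      · simp [casc, hself]

-- ===== VERDICT (by name: the statement is the Claim_ definition above) =====
theorem largestGoodInteger_spec : Claim_equal_largestGoodInteger := by
  intro num _
  unfold Spec_largestGoodInteger
  rw [A_eq_aTree, aTree_eq_casc, B_eq_casc]
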